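-- pv_equiv track=rewrite | github.com/MrBrantCode/unitest_baseline | mut_generate/mist_train_cf/cf_35578/solution.py | max_sum_of_lengths
-- ===== SOURCE A (Python) =====
-- def max_sum_of_lengths(n, data, k):
--     max_sum = 0
--     for i in range(len(data)):
--         subarray_set = set()
--         current_sum = 0
--         for j in range(i, len(data)):
--             if data[j] not in subarray_set:
--                 subarray_set.add(data[j])
--                 current_sum += len(data[j])
--                 if len(subarray_set) == k:
--                     if current_sum > max_sum:
--                         max_sum = current_sum
--             else:
--                 break
--     return max_sum
-- ===== SOURCE B (Python) =====
-- def max_sum_of_lengths(n, data, k):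
--     # One-pass sliding window: for each right end r, `left` is the smallest start
--     # such that data[left..r] are pairwise distinct; `ws` is the rolling sum of
--     # lengths of the last k elements.  O(n) instead of A's O(n*k).
--     if k <= 0:
--         return 0
--     last = {}
--     left = 0
--     ws = 0
--     best = 0
--     for r, x in enumerate(data):
--         ws += len(x)
--         if r >= k:
--             ws -= len(data[r - k])
--         p = last.get(x, -1)
--         if p + 1 > left:
--             left = p + 1
--         last[x] = r
--         if r >= k - 1 and left <= r - k + 1 and ws > best:
--             best = ws
--     return best
-- ===== Notes on version B (the rewrite author's own statement) =====
-- stated objective: faster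
-- what changed: Replaces A's restart-from-every-start quadratic scan with a single left-to-right pass that maintains the minimal distinct-window start via a last-occurrence dict and a rolling sum of the last k lengths.
import Mathlib
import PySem

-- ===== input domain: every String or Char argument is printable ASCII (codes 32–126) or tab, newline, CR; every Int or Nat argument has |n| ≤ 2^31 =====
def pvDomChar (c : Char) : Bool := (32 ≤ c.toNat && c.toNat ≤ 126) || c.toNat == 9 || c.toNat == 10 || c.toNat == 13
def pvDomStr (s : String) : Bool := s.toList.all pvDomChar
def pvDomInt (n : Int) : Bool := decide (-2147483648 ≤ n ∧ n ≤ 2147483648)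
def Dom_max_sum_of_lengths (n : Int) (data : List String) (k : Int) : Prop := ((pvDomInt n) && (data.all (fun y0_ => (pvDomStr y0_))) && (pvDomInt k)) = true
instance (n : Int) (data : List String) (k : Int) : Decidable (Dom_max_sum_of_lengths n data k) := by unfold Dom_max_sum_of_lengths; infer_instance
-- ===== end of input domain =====

-- B replaces A's quadratic restart-from-every-start scan by a single sliding-window pass
-- (last-occurrence dict + minimal distinct start + rolling sum of the last k lengths); objective: faster.


-- ===== PORT A =====
-- inner 'for j in range(i, len(data))' loop with break, over the suffix data[i:]
def innerA (k : Int) : List String → PySem.Set String → Int → Int → Int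
  | [], _, _, ms => ms
  | x :: rest, s, cs, ms =>
    if x ∉ s then
      let s' := PySem.Set.add s x
      let cs' := cs + PySem.Str.len x
      let ms' := if (PySem.Set.len s' : Int) = k then (if cs' > ms then cs' else ms) else ms
      innerA k rest s' cs' ms'
    else ms

def max_sum_of_lengths (n : Int) (data : List String) (k : Int) : Int :=
  (List.range data.length).foldl (fun ms i => innerA k (data.drop i) PySem.Set.empty 0 ms) 0

-- ===== PORT B =====
def bStep (data : List String) (k : Int)
    (st : PySem.Dict String Int × Int × Int × Int) (p : Int × String) :
    PySem.Dict String Int × Int × Int × Int :=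
  let last := st.1; let left := st.2.1; let ws := st.2.2.1; let best := st.2.2.2
  let r := p.1; let x := p.2
  let ws := ws + PySem.Str.len x
  let ws := if r ≥ k then ws - PySem.Str.len (PySem.List.pyGetD data (r - k) "") else ws
  let pr := PySem.Dict.getD last x (-1)
  let left := if pr + 1 > left then pr + 1 else left
  let last := PySem.Dict.insert last x r
  let best := if r ≥ k - 1 ∧ left ≤ r - k + 1 ∧ ws > best then ws else best
  (last, left, ws, best)

def max_sum_of_lengths_alt (n : Int) (data : List String) (k : Int) : Int :=
  if k ≤ 0 then 0
  else ((PySem.List.enumerate data 0).foldl (bStep data k)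
          (PySem.Dict.empty, 0, 0, 0)).2.2.2

-- ===== PRECONDITION & SPEC =====
def Spec_max_sum_of_lengths (n : Int) (data : List String) (k : Int) (out : Int) : Prop := out = max_sum_of_lengths_alt n data k
instance (n : Int) (data : List String) (k : Int) (out : Int) : Decidable (Spec_max_sum_of_lengths n data k out) := by unfold Spec_max_sum_of_lengths; infer_instance

-- ===== CLAIM (what is proved, stated in full; the proofs are below) =====
def Claim_equal_max_sum_of_lengths : Prop := ∀ (n : Int) (data : List String) (k : Int), Dom_max_sum_of_lengths n data k → Spec_max_sum_of_lengths n data k (max_sum_of_lengths n data k)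

-- ===== LEMMAS AND PROOFS =====
-- ---------- proof-side definitions ----------

-- sum of Python lengths of a list of strings
def sumLens (l : List String) : Int := (l.map PySem.Str.len).sum

-- sum of lengths over the slice [a, b) of L
def Sl (L : List String) (a b : Nat) : Int := sumLens ((L.drop a).take (b - a))

-- length of the longest prefix of `rest` whose elements are pairwise distinct and avoid `seen`
def ndpAux (seen : List String) : List String → Nat
  | [] => 0
  | x :: rest => if x ∈ seen then 0 else ndpAux (seen ++ [x]) rest + 1

-- last occurrence of x among the first r elements of L (-1 if none)
def lastD (L : List String) (x : String) : Nat → Int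
  | 0 => -1
  | r+1 => if L.getD r "" = x then (r : Int) else lastD L x r

-- B's `left` after processing r elements
def mLf (L : List String) : Nat → Int
  | 0 => 0
  | r+1 => if lastD L (L.getD r "") r + 1 > mLf L r then lastD L (L.getD r "") r + 1 else mLf L r

-- B's `ws` after processing r elements
def wsf (L : List String) (k : Int) : Nat → Int
  | 0 => 0
  | r+1 => if (r : Int) ≥ k then wsf L k r + PySem.Str.len (L.getD r "") - PySem.Str.len (PySem.List.pyGetD L ((r : Int) - k) "")
           else wsf L k r + PySem.Str.len (L.getD r "")

-- B's `best` after processing r elements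
def bestf (L : List String) (k : Int) : Nat → Int
  | 0 => 0
  | r+1 => if ((r : Int) ≥ k - 1 ∧ mLf L (r+1) ≤ (r : Int) - k + 1 ∧ wsf L k (r+1) > bestf L k r)
           then wsf L k (r+1) else bestf L k r

-- B's loop state after processing r elements
def stTake (L : List String) (k : Int) (r : Nat) : PySem.Dict String Int × Int × Int × Int :=
  ((PySem.List.enumerate L 0).take r).foldl (bStep L k) (PySem.Dict.empty, 0, 0, 0)

-- ---------- small helpers ----------

theorem ite_gt_eq_max (a b : Int) : (if b > a then b else a) = max a b := by
  by_cases h : b ≤ a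
  · simp [not_lt.mpr h, max_eq_left h]
  · rw [not_le] at h
    simp [h, max_eq_right h.le]

theorem slice_concat (L : List String) (a b : Nat) (hab : a ≤ b) (hb : b < L.length) :
    (L.drop a).take (b + 1 - a) = (L.drop a).take (b - a) ++ [L.getD b ""] := by
  have h1 : b + 1 - a = (b - a) + 1 := by omega
  rw [h1, List.take_succ]
  congr 1
  rw [List.getElem?_drop]
  have h2 : a + (b - a) = b := by omega
  rw [h2, List.getElem?_eq_getElem hb]
  simp [List.getD, List.getElem?_eq_getElem hb]

theorem slice_cons (L : List String) (a b : Nat) (ha : a < b) (hb : b ≤ L.length) :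
    (L.drop a).take (b - a) = L.getD a "" :: (L.drop (a+1)).take (b - (a+1)) := by
  have ha' : a < L.length := lt_of_lt_of_le ha hb
  rw [List.drop_eq_getElem_cons ha']
  have h1 : b - a = (b - (a+1)) + 1 := by omega
  rw [h1, List.take_succ_cons]
  simp [List.getD, List.getElem?_eq_getElem ha']

-- ---------- A-side closed form ----------

theorem innerA_eq (k : Int) (rest : List String) : ∀ (s : List String) (cs ms : Int),
    innerA k rest s cs ms =
      if 1 ≤ k - (s.length : Int) ∧ k - (s.length : Int) ≤ (ndpAux s rest : Int)
      then max ms (cs + sumLens (rest.take (k - (s.length : Int)).toNat))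
      else ms := by
  intro s cs ms
  induction rest generalizing s cs ms with
  | nil =>
    simp only [innerA, ndpAux, Nat.cast_zero, List.take_nil]
    rw [if_neg (by omega)]
  | cons x rest ih =>
    by_cases hx : x ∈ s
    · have hndp : ndpAux s (x :: rest) = 0 := by simp [ndpAux, hx]
      simp only [innerA, hx, not_true_eq_false, if_false, hndp, Nat.cast_zero]
      rw [if_neg (by omega)]
    · have hadd : PySem.Set.add s x = s ++ [x] := by
        simp [PySem.Set.add, PySem.Set.contains, hx]
      have hndp : ndpAux s (x :: rest) = ndpAux (s ++ [x]) rest + 1 := by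
        simp [ndpAux, hx]
      simp only [innerA, hx, not_false_eq_true, if_true, hadd]
      rw [ih, ite_gt_eq_max]
      simp only [PySem.Set.len, List.length_append, List.length_singleton, hndp]
      by_cases hk1 : k = (s.length : Int) + 1
      · have hC0 : ((s.length + 1 : Nat) : Int) = k := by push_cast; omega
        have hC1 : ¬ (1 ≤ k - ((s.length + 1 : Nat) : Int) ∧
            k - ((s.length + 1 : Nat) : Int) ≤ ((ndpAux (s ++ [x]) rest : Nat) : Int)) := by
          push_cast; omega
        have hC2 : 1 ≤ k - (s.length : Int) ∧
            k - (s.length : Int) ≤ ((ndpAux (s ++ [x]) rest + 1 : Nat) : Int) := by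
          push_cast; omega
        rw [if_pos hC0, if_neg hC1, if_pos hC2]
        have ht : (k - (s.length : Int)).toNat = 1 := by omega
        simp [sumLens, hk1]
      · have hC0 : ¬ (((s.length + 1 : Nat) : Int) = k) := by push_cast; omega
        rw [if_neg hC0]
        have hiff : (1 ≤ k - ((s.length + 1 : Nat) : Int) ∧
              k - ((s.length + 1 : Nat) : Int) ≤ ((ndpAux (s ++ [x]) rest : Nat) : Int)) ↔
            (1 ≤ k - (s.length : Int) ∧
              k - (s.length : Int) ≤ ((ndpAux (s ++ [x]) rest + 1 : Nat) : Int)) := by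
          push_cast; omega
        by_cases hc : 1 ≤ k - (s.length : Int) ∧
            k - (s.length : Int) ≤ ((ndpAux (s ++ [x]) rest + 1 : Nat) : Int)
        · rw [if_pos (hiff.mpr hc), if_pos hc]
          have ht : (k - (s.length : Int)).toNat = (k - ((s.length : Int) + 1)).toNat + 1 := by
            push_cast at hc; omega
          have ht2 : (k - ((s.length + 1 : Nat) : Int)) = k - ((s.length : Int) + 1) := by
            push_cast; ring
          rw [ht2, ht, List.take_succ_cons]
          simp [sumLens]
          ring_nf
        · rw [if_neg (fun h => hc (hiff.mp h)), if_neg hc]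

theorem ndp_le_iff (rest : List String) : ∀ (seen : List String) (t : Nat),
    t ≤ ndpAux seen rest ↔
      t ≤ rest.length ∧ (rest.take t).Nodup ∧ ∀ y ∈ rest.take t, y ∉ seen := by
  induction rest with
  | nil => intro seen t; simp [ndpAux]
  | cons x rest ih =>
    intro seen t
    cases t with
    | zero => simp
    | succ t =>
      by_cases hx : x ∈ seen
      · have hL : ndpAux seen (x :: rest) = 0 := by simp [ndpAux, hx]
        rw [hL, List.take_succ_cons]
        constructor
        · intro h; omega
        · rintro ⟨h1, h2, h3⟩
          exact absurd hx (h3 x (by simp))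
      · have hL : ndpAux seen (x :: rest) = ndpAux (seen ++ [x]) rest + 1 := by
          simp [ndpAux, hx]
        rw [hL, List.take_succ_cons]
        constructor
        · intro h
          obtain ⟨h1, h2, h3⟩ := (ih (seen ++ [x]) t).mp (by omega)
          refine ⟨by simp; omega, ?_, ?_⟩
          · refine List.nodup_cons.mpr ⟨?_, h2⟩
            intro hm
            have := h3 x hm
            simp at this
          · intro y hy
            rcases List.mem_cons.mp hy with rfl | hy'
            · exact hx
            · intro hs
              exact (h3 y hy') (by simp [hs])
        · rintro ⟨h1, h2, h3⟩
          have h2' := List.nodup_cons.mp h2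
          have : t ≤ ndpAux (seen ++ [x]) rest := by
            refine (ih (seen ++ [x]) t).mpr ⟨by simp at h1; omega, h2'.2, ?_⟩
            intro y hy
            simp only [List.mem_append, List.mem_singleton, not_or]
            refine ⟨h3 y (List.mem_cons_of_mem _ hy), ?_⟩
            intro hyx
            subst hyx
            exact h2'.1 hy
          omega

-- ---------- lastD / mLf characterisations ----------

theorem lastD_bounds (L : List String) (x : String) (r : Nat) :
    -1 ≤ lastD L x r ∧ lastD L x r < (r : Int) := by
  induction r with
  | zero => simp [lastD]
  | succ r ih => unfold lastD; split <;> [skip; skip] <;> push_cast <;> omega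

theorem lastD_lt_iff (L : List String) : ∀ (r : Nat), r ≤ L.length → ∀ (x : String) (i : Nat), i ≤ r →
    (lastD L x r < (i : Int) ↔ x ∉ (L.drop i).take (r - i)) := by
  intro r
  induction r with
  | zero =>
    intro _ x i hi
    have : i = 0 := by omega
    subst this
    simp [lastD]
  | succ r ih =>
    intro hr x i hi
    have hrm : r < L.length := by omega
    unfold lastD
    by_cases hi' : i ≤ r
    · rw [slice_concat L i r hi' hrm]
      simp only [List.mem_append, List.mem_singleton, not_or]
      by_cases hx : L.getD r "" = x
      · rw [if_pos hx]
        constructor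
        · intro h; exfalso; omega
        · rintro ⟨_, hne⟩
          exact absurd hx.symm hne
      · rw [if_neg hx]
        rw [ih (by omega) x i hi']
        exact ⟨fun h => ⟨h, fun he => hx he.symm⟩, fun h => h.1⟩
    · have : i = r + 1 := by omega
      subst this
      simp only [Nat.sub_self, List.take_zero, List.not_mem_nil, not_false_eq_true, iff_true]
      have hb := lastD_bounds L x r
      split <;> omega

theorem mLf_bounds (L : List String) (r : Nat) : 0 ≤ mLf L r ∧ mLf L r ≤ (r : Int) := by
  induction r with
  | zero => simp [mLf]
  | succ r ih =>
    have h := lastD_bounds L (L.getD r "") r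
    unfold mLf; split <;> omega

theorem mLf_le_iff (L : List String) : ∀ (r : Nat), r ≤ L.length → ∀ (i : Nat), i ≤ r →
    (mLf L r ≤ (i : Int) ↔ ((L.drop i).take (r - i)).Nodup) := by
  intro r
  induction r with
  | zero =>
    intro _ i hi
    have : i = 0 := by omega
    simp [this, mLf]
  | succ r ih =>
    intro hr i hi
    have hrm : r < L.length := by omega
    unfold mLf
    by_cases hi' : i ≤ r
    · rw [slice_concat L i r hi' hrm]
      have hA := ih (by omega) i hi'
      have hB := lastD_lt_iff L r (by omega) (L.getD r "") i hi'
      have hcat : (((L.drop i).take (r - i)) ++ [L.getD r ""]).Nodup ↔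
          ((L.drop i).take (r - i)).Nodup ∧ L.getD r "" ∉ (L.drop i).take (r - i) := by
        rw [List.nodup_append]
        constructor
        · rintro ⟨h1, _, h3⟩
          exact ⟨h1, fun hm => h3 _ hm _ (by simp) rfl⟩
        · rintro ⟨h1, h2⟩
          refine ⟨h1, List.nodup_singleton _, ?_⟩
          intro a ha b hb
          rw [List.mem_singleton] at hb
          subst hb
          intro he
          rw [he] at ha
          exact h2 ha
      rw [hcat, ← hA, ← hB]
      split <;> omega
    · have : i = r + 1 := by omega
      subst this
      simp only [Nat.sub_self, List.take_zero, List.nodup_nil, iff_true]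
      have h1 := mLf_bounds L r
      have h2 := lastD_bounds L (L.getD r "") r
      split <;> omega

-- ---------- wsf characterisation ----------

theorem wsf_eq (L : List String) (k : Int) (hk : 1 ≤ k) :
    ∀ (r : Nat), r ≤ L.length → wsf L k r = Sl L (r - k.toNat) r := by
  intro r
  induction r with
  | zero => intro _; simp [wsf, Sl, sumLens]
  | succ r ih =>
    intro hr
    have hrm : r < L.length := by omega
    have hcon : Sl L (r - k.toNat) (r + 1) = Sl L (r - k.toNat) r + PySem.Str.len (L.getD r "") := by
      unfold Sl
      rw [slice_concat L (r - k.toNat) r (by omega) hrm]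
      simp [sumLens]
    unfold wsf
    by_cases hge : (r : Int) ≥ k
    · rw [if_pos hge, ih (by omega)]
      have hk' : k.toNat ≤ r := by omega
      have hpy : PySem.List.pyGetD L ((r : Int) - k) "" = L.getD (r - k.toNat) "" := by
        have hc : (r : Int) - k = ((r - k.toNat : Nat) : Int) := by push_cast; omega
        rw [hc, PySem.List.pyGetD_natCast]
      rw [hpy]
      have hstep : Sl L (r + 1 - k.toNat) (r + 1) =
          Sl L (r - k.toNat) (r + 1) - PySem.Str.len (L.getD (r - k.toNat) "") := by
        have h2 : r + 1 - k.toNat = (r - k.toNat) + 1 := by omega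
        rw [h2]
        unfold Sl
        rw [slice_cons L (r - k.toNat) (r + 1) (by omega) (by omega)]
        simp [sumLens]
      rw [hstep, hcon]
    · rw [if_neg hge, ih (by omega)]
      have h0 : r - k.toNat = 0 := by omega
      have h0' : r + 1 - k.toNat = 0 := by omega
      rw [h0] at hcon
      rw [h0, h0', hcon]

-- ---------- B loop invariant ----------

theorem stTake_succ (L : List String) (k : Int) (r : Nat) (hr : r < L.length) :
    stTake L k (r+1) = bStep L k (stTake L k r) ((r : Int), L.getD r "") := by
  unfold stTake
  have hlen : r < (PySem.List.enumerate L 0).length := by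
    simpa [PySem.List.length_enumerate] using hr
  rw [List.take_succ]
  have he : (PySem.List.enumerate L 0)[r]? = some (((r : Nat) : Int), L.getD r "") := by
    rw [PySem.List.getElem?_enumerate, List.getElem?_eq_getElem hr]
    simp [List.getD, List.getElem?_eq_getElem hr]
  rw [he]
  simp [List.foldl_append]

theorem B_inv (L : List String) (k : Int) : ∀ (r : Nat), r ≤ L.length →
    (∀ x, PySem.Dict.getD (stTake L k r).1 x (-1) = lastD L x r) ∧
    (stTake L k r).2.1 = mLf L r ∧ (stTake L k r).2.2.1 = wsf L k r ∧
    (stTake L k r).2.2.2 = bestf L k r := by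
  intro r
  induction r with
  | zero =>
    intro _
    refine ⟨fun x => ?_, rfl, rfl, rfl⟩
    simp [stTake, lastD, PySem.Dict.getD_empty]
  | succ r ih =>
    intro hr
    obtain ⟨hd, hl, hw, hb⟩ := ih (by omega)
    rw [stTake_succ L k r (by omega)]
    simp only [bStep]
    refine ⟨fun x => ?_, ?_, ?_, ?_⟩
    · rw [PySem.Dict.getD_insert, hd x]
      have hlast : lastD L x (r+1) = if L.getD r "" = x then ((r : Nat) : Int) else lastD L x r := rfl
      rw [hlast]
      by_cases hx : x = L.getD r ""
      · rw [if_pos hx, if_pos hx.symm]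
      · rw [if_neg hx, if_neg (fun h => hx h.symm)]
    · rw [hd, hl]
      rfl
    · rw [hw]
      rfl
    · rw [hd, hl, hw, hb]
      rfl

theorem bestf_eq_fold (L : List String) (k : Int) (r : Nat) :
    bestf L k r = (List.range r).foldl
      (fun b (j : Nat) => if ((j : Int) ≥ k - 1 ∧ mLf L (j+1) ≤ (j : Int) - k + 1) then max b (wsf L k (j+1)) else b) 0 := by
  induction r with
  | zero => simp [bestf]
  | succ r ih =>
    rw [List.range_succ, List.foldl_append, ← ih]
    simp only [List.foldl_cons, List.foldl_nil]
    have hb1 : bestf L k (r+1) = if ((r : Int) ≥ k - 1 ∧ mLf L (r+1) ≤ (r : Int) - k + 1 ∧ wsf L k (r+1) > bestf L k r) then wsf L k (r+1) else bestf L k r := rfl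
    rw [hb1]
    by_cases hc : ((r : Int) ≥ k - 1 ∧ mLf L (r+1) ≤ (r : Int) - k + 1)
    · obtain ⟨h1, h2⟩ := hc
      by_cases hw : wsf L k (r+1) > bestf L k r
      · rw [if_pos ⟨h1, h2, hw⟩, if_pos ⟨h1, h2⟩]
        exact (max_eq_right hw.le).symm
      · rw [if_neg (by tauto), if_pos ⟨h1, h2⟩]
        exact (max_eq_left (not_lt.mp hw)).symm
    · rw [if_neg (by tauto), if_neg hc]

-- ---------- fold machinery ----------

theorem fold_max_filterMap (l : List Nat) (P : Nat → Prop) [DecidablePred P] (v : Nat → Int) :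
    ∀ b, l.foldl (fun ms i => if P i then max ms (v i) else ms) b
      = (l.filterMap (fun i => if P i then some (v i) else none)).foldl max b := by
  induction l with
  | nil => intro b; rfl
  | cons x l ih =>
    intro b
    by_cases h : P x <;> simp [h, ih]

theorem filterMap_shift (g : Nat → Option Int) (d m : Nat)
    (hg : ∀ i, m - d ≤ i → g i = none) :
    (List.range m).filterMap (fun r => if d ≤ r then g (r - d) else none)
      = (List.range m).filterMap g := by
  by_cases hdm : d ≤ m
  · obtain ⟨e, rfl⟩ : ∃ e, m = d + e := ⟨m - d, by omega⟩
    have hR : (List.range (d + e)).filterMap g = (List.range e).filterMap g := by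
      rw [show d + e = e + d from by omega, List.range_add, List.filterMap_append]
      have hz : ((List.range d).map (e + ·)).filterMap g = [] := by
        rw [List.filterMap_map]
        apply List.filterMap_eq_nil_iff.mpr
        intro a _
        exact hg (e + a) (by omega)
      rw [hz, List.append_nil]
    conv_rhs => rw [hR]
    rw [List.range_add, List.filterMap_append]
    have hA : (List.range d).filterMap (fun r => if d ≤ r then g (r - d) else none) = [] := by
      apply List.filterMap_eq_nil_iff.mpr
      intro a ha
      rw [List.mem_range] at ha
      rw [if_neg (by omega)]
    have hB : ((List.range e).map (d + ·)).filterMap (fun r => if d ≤ r then g (r - d) else none)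
        = (List.range e).filterMap g := by
      rw [List.filterMap_map]
      apply List.filterMap_congr
      intro a _
      simp only [Function.comp_apply]
      rw [if_pos (by omega)]
      congr 1
      omega
    rw [hA, hB, List.nil_append]
  · have hL : (List.range m).filterMap (fun r => if d ≤ r then g (r - d) else none) = [] := by
      apply List.filterMap_eq_nil_iff.mpr
      intro a ha
      rw [List.mem_range] at ha
      rw [if_neg (by omega)]
    have hR : (List.range m).filterMap g = [] := by
      apply List.filterMap_eq_nil_iff.mpr
      intro a ha
      exact hg a (by omega)
    rw [hL, hR]

-- ---------- assembly ----------

theorem A_eq_fold (n : Int) (L : List String) (k : Int) (hk : 1 ≤ k) :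
    max_sum_of_lengths n L k = (List.range L.length).foldl
      (fun ms (i : Nat) => if (i + k.toNat ≤ L.length ∧ ((L.drop i).take k.toNat).Nodup)
                   then max ms (Sl L i (i + k.toNat)) else ms) 0 := by
  unfold max_sum_of_lengths
  apply PySem.List.foldl_congr_mem
  intro ms i hi
  rw [List.mem_range] at hi
  rw [show (PySem.Set.empty : PySem.Set String) = ([] : List String) from rfl]
  rw [innerA_eq k (L.drop i) [] 0 ms]
  simp only [List.length_nil, Nat.cast_zero, sub_zero, zero_add]
  have hnd := ndp_le_iff (L.drop i) [] k.toNat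
  have hlen : (L.drop i).length = L.length - i := List.length_drop
  have hiff : (1 ≤ k ∧ k ≤ (ndpAux [] (L.drop i) : Int)) ↔
      (i + k.toNat ≤ L.length ∧ ((L.drop i).take k.toNat).Nodup) := by
    constructor
    · rintro ⟨h1, h2⟩
      obtain ⟨ha, hb, _⟩ := hnd.mp (by omega)
      exact ⟨by omega, hb⟩
    · rintro ⟨h1, h2⟩
      refine ⟨hk, ?_⟩
      have := hnd.mpr ⟨by omega, h2, by simp⟩
      omega
  have hval : sumLens ((L.drop i).take k.toNat) = Sl L i (i + k.toNat) := by
    unfold Sl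
    have hh : i + k.toNat - i = k.toNat := by omega
    rw [hh]
  rw [if_congr hiff (by rw [hval]) rfl]

theorem main_eq (n : Int) (L : List String) (k : Int) :
    max_sum_of_lengths n L k = max_sum_of_lengths_alt n L k := by
  by_cases hk : k ≤ 0
  · unfold max_sum_of_lengths max_sum_of_lengths_alt
    rw [if_pos hk]
    have hcong : List.foldl (fun ms i => innerA k (L.drop i) PySem.Set.empty 0 ms) 0
        (List.range L.length) = List.foldl (fun (ms : Int) (_ : Nat) => ms) 0 (List.range L.length) := by
      apply PySem.List.foldl_congr_mem
      intro ms i _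
      rw [show (PySem.Set.empty : PySem.Set String) = ([] : List String) from rfl]
      rw [innerA_eq k (L.drop i) [] 0 ms]
      rw [if_neg (by push_cast; omega)]
    rw [hcong]
    exact PySem.List.foldl_ignore _ _
  · rw [not_le] at hk
    have hk1 : 1 ≤ k := hk
    have hkc : (k.toNat : Int) = k := Int.toNat_of_nonneg (by omega)
    -- B side: the fold is bestf at L.length
    have hBe : max_sum_of_lengths_alt n L k = bestf L k L.length := by
      unfold max_sum_of_lengths_alt
      rw [if_neg (by omega)]
      have htk : (PySem.List.enumerate L 0).take L.length = PySem.List.enumerate L 0 := by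
        apply List.take_of_length_le
        simp [PySem.List.length_enumerate]
      have := (B_inv L k L.length (le_refl _)).2.2.2
      rw [← this]
      unfold stTake
      rw [htk]
    rw [hBe, bestf_eq_fold, A_eq_fold n L k hk1]
    rw [fold_max_filterMap (List.range L.length)
        (fun (i : Nat) => (i + k.toNat ≤ L.length ∧ ((L.drop i).take k.toNat).Nodup))
        (fun (i : Nat) => Sl L i (i + k.toNat)) 0]
    rw [fold_max_filterMap (List.range L.length)
        (fun (j : Nat) => ((j : Int) ≥ k - 1 ∧ mLf L (j+1) ≤ (j : Int) - k + 1))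
        (fun (j : Nat) => wsf L k (j+1)) 0]
    congr 1
    have hstep : ∀ r ∈ List.range L.length,
        (fun (j : Nat) => if ((j : Int) ≥ k - 1 ∧ mLf L (j+1) ≤ (j : Int) - k + 1)
            then some (wsf L k (j+1)) else none) r
        = (fun (r : Nat) => if k.toNat - 1 ≤ r
            then (fun (i : Nat) => if (i + k.toNat ≤ L.length ∧ ((L.drop i).take k.toNat).Nodup)
              then some (Sl L i (i + k.toNat)) else none) (r - (k.toNat - 1)) else none) r := by
      intro r hr
      rw [List.mem_range] at hr
      simp only
      by_cases hr2 : k.toNat - 1 ≤ r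
      · rw [if_pos hr2]
        set i := r - (k.toNat - 1) with hidef
        have hik : i + k.toNat = r + 1 := by omega
        have hiff : ((r : Int) ≥ k - 1 ∧ mLf L (r+1) ≤ (r : Int) - k + 1) ↔
            (i + k.toNat ≤ L.length ∧ ((L.drop i).take k.toNat).Nodup) := by
          have hm := mLf_le_iff L (r+1) (by omega) i (by omega)
          have hti : r + 1 - i = k.toNat := by omega
          rw [hti] at hm
          have hci : ((i : Nat) : Int) = (r : Int) - k + 1 := by push_cast; omega
          constructor
          · rintro ⟨h1, h2⟩
            refine ⟨by omega, hm.mp (by rw [hci]; exact h2)⟩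
          · rintro ⟨h1, h2⟩
            refine ⟨by omega, ?_⟩
            rw [← hci]
            exact hm.mpr h2
        have hval : wsf L k (r+1) = Sl L i (i + k.toNat) := by
          rw [wsf_eq L k hk1 (r+1) (by omega)]
          congr 1 <;> omega
        rw [if_congr hiff (by rw [hval]) rfl]
      · rw [if_neg hr2]
        rw [if_neg (by push_cast; omega)]
    rw [List.filterMap_congr hstep]
    exact (filterMap_shift
      (fun (i : Nat) => if (i + k.toNat ≤ L.length ∧ ((L.drop i).take k.toNat).Nodup)
        then some (Sl L i (i + k.toNat)) else none)
      (k.toNat - 1) L.length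
      (fun i hi => if_neg (by omega))).symm


-- ===== VERDICT (by name: the statement is the Claim_ definition above) =====
theorem max_sum_of_lengths_spec : Claim_equal_max_sum_of_lengths := by
  intro n data k _
  exact main_eq n data k
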